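-- pv_equiv track=rewrite | github.com/Coslate/CMU_10601_Machine_Learning | HW8/handout/q_learning.py | selMaxAction
-- ===== SOURCE A (Python) =====
-- def selMaxAction(action_sel_arr: []):
--     assert len(action_sel_arr) > 0
--
--     if len(action_sel_arr) == 1:
--         return 0
--
--     action = 0
--     q_value_max = action_sel_arr[0]
--     for index in range(1, len(action_sel_arr)):
--         if action_sel_arr[index] > q_value_max:
--             action = index
--             q_value_max = action_sel_arr[index]
--     return action
-- ===== SOURCE B (Python) =====
-- def selMaxAction(action_sel_arr: []):
--     assert len(action_sel_arr) > 0
--     m = max(action_sel_arr)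
--     return action_sel_arr.index(m)
-- ===== Notes on version B (the rewrite author's own statement) =====
-- stated objective: simpler
-- what changed: Replaces A's single fused loop threading (best index, best value) with two library passes: max() to find the maximum value, then list.index() for its first position; first-occurrence tie-break matches A's strict '>' comparison.
import Mathlib
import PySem

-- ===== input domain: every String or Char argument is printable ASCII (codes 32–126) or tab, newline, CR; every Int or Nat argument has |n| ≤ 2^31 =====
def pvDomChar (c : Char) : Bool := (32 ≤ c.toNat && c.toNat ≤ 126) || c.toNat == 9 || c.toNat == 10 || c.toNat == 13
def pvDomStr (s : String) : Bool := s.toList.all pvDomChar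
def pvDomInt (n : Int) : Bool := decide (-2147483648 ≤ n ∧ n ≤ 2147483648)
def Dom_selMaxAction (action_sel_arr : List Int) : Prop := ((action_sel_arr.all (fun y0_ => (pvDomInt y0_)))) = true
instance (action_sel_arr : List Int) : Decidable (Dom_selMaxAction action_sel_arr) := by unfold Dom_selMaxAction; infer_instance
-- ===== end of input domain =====

-- B replaces A's fused best-index/best-value loop with two library passes (max, then first index); objective: simpler.


-- ===== PORT A =====
-- literal port of A: assert handled by Pre_; single loop over range(1, len) threading (action, q_value_max)
def selMaxAction (action_sel_arr : List Int) : Int :=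
  if action_sel_arr.length = 1 then 0
  else
    let st := (PySem.List.pyRange 1 (action_sel_arr.length : Int) 1).foldl
      (fun (s : Int × Int) index =>
        if PySem.List.pyGetD action_sel_arr index 0 > s.2 then
          (index, PySem.List.pyGetD action_sel_arr index 0)
        else s)
      (0, PySem.List.pyGetD action_sel_arr 0 0)
    st.1

-- ===== PORT B =====
-- literal port of B: m = max(xs); return xs.index(m)
def selMaxAction_alt (action_sel_arr : List Int) : Int :=
  match PySem.List.max? action_sel_arr (fun y => y) with
  | none => 0
  | some m =>
    match PySem.List.index? action_sel_arr m with
    | some k => (k : Int)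
    | none => 0

-- ===== PRECONDITION & SPEC =====
-- Pre_ excludes only the empty list, on which A's assert raises AssertionError.
def Pre_selMaxAction (action_sel_arr : List Int) : Prop := action_sel_arr ≠ []
instance (action_sel_arr : List Int) : Decidable (Pre_selMaxAction action_sel_arr) := by unfold Pre_selMaxAction; infer_instance
def pvWitness_selMaxAction : List Int := [3, 7, 7, 1]

def Spec_selMaxAction (action_sel_arr : List Int) (out : Int) : Prop := out = selMaxAction_alt action_sel_arr
instance (action_sel_arr : List Int) (out : Int) : Decidable (Spec_selMaxAction action_sel_arr out) := by unfold Spec_selMaxAction; infer_instance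

-- ===== CLAIM (what is proved, stated in full; the proofs are below) =====
def Claim_equal_selMaxAction : Prop := ∀ (action_sel_arr : List Int), Dom_selMaxAction action_sel_arr → Pre_selMaxAction action_sel_arr → Spec_selMaxAction action_sel_arr (selMaxAction action_sel_arr)

-- ===== LEMMAS AND PROOFS =====

-- the running maximum of a nonempty list (the value A's q_value_max holds at the end)
def pvMax : List Int → Int
  | [] => 0
  | x :: t => t.foldl max x

lemma pvMax_mem (xs : List Int) (h : xs ≠ []) : pvMax xs ∈ xs := by
  match xs with
  | x :: t =>
    simp only [pvMax]
    rcases PySem.List.foldl_max_mem t x with h1 | h1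
    · simp [h1]
    · exact List.mem_cons_of_mem _ h1

lemma pvMax_isMax (xs : List Int) : ∀ z ∈ xs, z ≤ pvMax xs := by
  match xs with
  | [] => simp
  | x :: t =>
    intro z hz
    simp only [pvMax]
    rcases List.mem_cons.mp hz with rfl | hz
    · exact (PySem.List.le_foldl_max t z).1
    · exact (PySem.List.le_foldl_max t x).2 z hz

lemma pvMax_append (ys : List Int) (y : Int) (h : ys ≠ []) :
    pvMax (ys ++ [y]) = max (pvMax ys) y := by
  match ys with
  | a :: t => simp [pvMax, List.foldl_append]

-- A's loop computes exactly (first index of the max, the max)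
lemma loop_eq (xs : List Int) (h : xs ≠ []) :
    (PySem.List.pyRange 1 (xs.length : Int) 1).foldl
      (fun (s : Int × Int) index =>
        if PySem.List.pyGetD xs index 0 > s.2 then
          (index, PySem.List.pyGetD xs index 0)
        else s)
      (0, PySem.List.pyGetD xs 0 0)
    = ((((PySem.List.index? xs (pvMax xs)).getD 0 : Nat) : Int), pvMax xs) := by
  induction xs using List.reverseRecOn with
  | nil => exact absurd rfl h
  | append_singleton ys y ih =>
    by_cases hys : ys = []
    · subst hys
      have h1 : PySem.List.pyRange 1 ((([] ++ [y] : List Int)).length : Int) 1 = [] := by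
        norm_num [PySem.List.pyRange_one_eq_nil]
      rw [h1]
      have h2 : PySem.List.index? ([] ++ [y] : List Int) (pvMax ([] ++ [y])) = some 0 := by
        simp [pvMax, PySem.List.index?_eq_idxOf?]
      rw [h2]
      simp [pvMax, PySem.List.pyGetD_zero_cons]
    · have hlen : 1 ≤ (ys.length : Int) := by
        have := List.length_pos_iff.mpr hys; omega
      have hrange : PySem.List.pyRange 1 ((ys ++ [y]).length : Int) 1
          = PySem.List.pyRange 1 (ys.length : Int) 1 ++ [(ys.length : Int)] := by
        rw [List.length_append]
        push_cast
        exact PySem.List.pyRange_one_succ_right hlen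
      rw [hrange, List.foldl_append]
      -- on indices < ys.length, getting from ys ++ [y] is getting from ys
      have hcongr :
          (PySem.List.pyRange 1 (ys.length : Int) 1).foldl
            (fun (s : Int × Int) index =>
              if PySem.List.pyGetD (ys ++ [y]) index 0 > s.2 then
                (index, PySem.List.pyGetD (ys ++ [y]) index 0)
              else s)
            (0, PySem.List.pyGetD (ys ++ [y]) 0 0)
          = (PySem.List.pyRange 1 (ys.length : Int) 1).foldl
            (fun (s : Int × Int) index =>
              if PySem.List.pyGetD ys index 0 > s.2 then
                (index, PySem.List.pyGetD ys index 0)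
              else s)
            (0, PySem.List.pyGetD ys 0 0) := by
        have h0 : PySem.List.pyGetD (ys ++ [y]) 0 0 = PySem.List.pyGetD ys 0 0 := by
          have hlp : 0 < ys.length := List.length_pos_iff.mpr hys
          have hl2 : (0:Int) < ((ys ++ [y]).length : Int) := by simp
          rw [PySem.List.pyGetD_eq_getElem (ys ++ [y]) 0 (by omega) hl2,
              PySem.List.pyGetD_eq_getElem ys 0 (by omega) (by omega)]
          exact List.getElem_append_left hlp
        rw [h0]
        apply PySem.List.foldl_congr_mem
        intro acc j hj
        have hj' := (PySem.List.mem_pyRange_one).mp hj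
        have hget : PySem.List.pyGetD (ys ++ [y]) j 0 = PySem.List.pyGetD ys j 0 := by
          have hl2 : j < ((ys ++ [y]).length : Int) := by
            rw [List.length_append]; push_cast; omega
          rw [PySem.List.pyGetD_eq_getElem (ys ++ [y]) 0 (by omega) hl2,
              PySem.List.pyGetD_eq_getElem ys 0 (by omega) (by omega)]
          have hjn : j.toNat < ys.length := by omega
          exact List.getElem_append_left hjn
        rw [hget]
      rw [hcongr, ih hys]
      have hy : PySem.List.pyGetD (ys ++ [y]) (ys.length : Int) 0 = y := by
        have hl2 : (ys.length : Int) < ((ys ++ [y]).length : Int) := by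
          simp
        rw [PySem.List.pyGetD_eq_getElem (ys ++ [y]) 0 (Int.natCast_nonneg _) hl2]
        simp
      simp only [List.foldl_cons, List.foldl_nil, hy]
      by_cases hgt : y > pvMax ys
      · rw [if_pos hgt]
        have hnot : pvMax (ys ++ [y]) = y := by
          rw [pvMax_append ys y hys]; omega
        have hnm : y ∉ ys := fun hmem => absurd (pvMax_isMax ys y hmem) (by omega)
        rw [hnot, PySem.List.index?_append_singleton_self ys y hnm]
        simp
      · rw [if_neg hgt]
        have hmax : pvMax (ys ++ [y]) = pvMax ys := by
          rw [pvMax_append ys y hys]; omega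
        rw [hmax, PySem.List.index?_append_of_mem [y] (pvMax_mem ys hys)]

lemma alt_eq (xs : List Int) (h : xs ≠ []) :
    selMaxAction_alt xs = (((PySem.List.index? xs (pvMax xs)).getD 0 : Nat) : Int) := by
  match xs with
  | x :: t =>
    have hmax : PySem.List.max? (x :: t) (fun y => y) = some (pvMax (x :: t)) := by
      rw [PySem.List.max?_id_cons]; rfl
    have hmem : pvMax (x :: t) ∈ (x :: t) := pvMax_mem _ h
    obtain ⟨k, hk⟩ := Option.isSome_iff_exists.mp
      ((PySem.List.index?_isSome_iff (x :: t) (pvMax (x :: t))).mpr hmem)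
    simp only [selMaxAction_alt, hmax]
    rw [hk]
    simp

-- ===== VERDICT (by name: the statement is the Claim_ definition above) =====
theorem selMaxAction_spec : Claim_equal_selMaxAction := by
  intro xs _ hpre
  unfold Spec_selMaxAction selMaxAction
  by_cases hlen : xs.length = 1
  · obtain ⟨x, rfl⟩ := List.length_eq_one_iff.mp hlen
    have h1 : selMaxAction_alt [x] = 0 := by
      simp only [selMaxAction_alt, PySem.List.max?_id_cons, List.foldl_nil]
      rw [PySem.List.index?_cons_self x []]
      rfl
    rw [if_pos hlen, h1]
  · rw [if_neg hlen, loop_eq xs hpre, alt_eq xs hpre]
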